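-- pv_equiv track=rewrite | github.com/HighDiceRoller/icepool | src/icepool/math.py | iter_hypergeom
-- ===== SOURCE A (Python) =====
-- from typing import Iterator, MutableMapping, Sequence
--
-- comb_row_cache: MutableMapping[int, list[tuple[int, ...]]] = {}
--
-- def comb_row(n: int, b: int) -> tuple[int, ...]:
--     """A tuple of n+1 elements, where the kth element is equal to math.comb(n, k) * b ** k.
--
--     The results are cached.
--     """
--     if b not in comb_row_cache:
--         comb_row_cache[b] = [(1, )]
--     rows = comb_row_cache[b]
--     while len(rows) < n + 1:
--         prev = rows[-1]
--         next = (1, ) + tuple(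
--             x + b * y for x, y in zip(prev[1:], prev[:-1])) + (b * prev[-1], )
--         rows.append(next)
--     return rows[n]
--
-- def comb(n: int, k: int, b: int = 1) -> int:
--     """As `math.comb()`, but using the cached `comb_row()`."""
--     return comb_row(n, b)[k]
--
-- def iter_hypergeom(deck: tuple[int, ...],
--                    draws: int) -> Iterator[tuple[tuple[int, ...], int]]:
--     """Iterates over the (hand, weight)s in the given `Deck`.
--
--     Args:
--         deck: The number of duplicates of each card in the `Deck`.
--         draws: The total number of cards to draw.
--
--     Yields:
--         hand: A tuple of how many of each card were drawn.
--         weight: The weight of drawing that hand.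
--     """
--     if len(deck) == 0:
--         yield (), 1
--         return
--
--     deck_count = deck[0]
--     deck_size = sum(deck)  # assume deck is small?
--
--     min_count = max(0, deck_count + draws - deck_size)
--     max_count = min(deck_count, draws)
--
--     for count in range(min_count, max_count + 1):
--         weight = comb(draws, count)
--         for tail_count, tail_weight in iter_hypergeom(deck[1:], draws - count):
--             yield (count, ) + tail_count, weight * tail_weight
-- ===== SOURCE B (Python) =====
-- def iter_hypergeom(deck, draws):
--     """Iterative forward DP over card positions instead of recursion.
--
--     Maintains an in-order worklist of states (partial_hand, weight,
--     remaining_draws); binomials are computed by the multiplicative formula.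
--     """
--     def binom(n, k):
--         c = 1
--         for j in range(k):
--             c = c * (n - j) // (j + 1)
--         return c
--
--     states = [((), 1, draws)]
--     rem = sum(deck)
--     for deck_count in deck:
--         nxt = []
--         for hand, weight, d in states:
--             lo = max(0, deck_count + d - rem)
--             hi = min(deck_count, d)
--             for count in range(lo, hi + 1):
--                 nxt.append((hand + (count,), weight * binom(d, count), d - count))
--         states = nxt
--         rem -= deck_count
--     for hand, weight, d in states:
--         yield hand, weight
-- ===== Notes on version B (the rewrite author's own statement) =====
-- stated objective: alternative
-- what changed: Replaces A's recursive generator (with a cached Pascal-row binomial table) by an iterative forward DP over a worklist of (partial_hand, weight, remaining_draws) states, one pass per card with a running suffix size, computing binomials by the multiplicative formula.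
import Mathlib
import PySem

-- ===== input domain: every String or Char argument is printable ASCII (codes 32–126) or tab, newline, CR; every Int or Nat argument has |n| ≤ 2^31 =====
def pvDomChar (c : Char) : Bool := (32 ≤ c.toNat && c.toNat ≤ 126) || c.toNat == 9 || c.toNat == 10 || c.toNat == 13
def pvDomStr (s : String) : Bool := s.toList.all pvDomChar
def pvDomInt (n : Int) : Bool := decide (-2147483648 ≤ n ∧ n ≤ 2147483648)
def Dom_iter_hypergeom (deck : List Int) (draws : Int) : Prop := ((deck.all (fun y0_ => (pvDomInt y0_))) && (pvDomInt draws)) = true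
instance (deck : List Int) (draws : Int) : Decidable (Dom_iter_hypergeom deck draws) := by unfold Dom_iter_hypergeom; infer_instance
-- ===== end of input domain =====

-- B replaces A's recursive generator by an iterative forward DP over a worklist of
-- partial-hand states (objective: alternative decomposition, same enumeration order).

-- ===== PORT A =====
-- comb_row(n, 1): Pascal-row construction, row by row ('while len(rows) < n + 1').
def combRowNext (prev : List Int) : List Int :=
  1 :: (List.zipWith (fun x y => x + 1 * y) (prev.drop 1) prev.dropLast) ++ [1 * prev.getLastD 0]

def combRow : Nat → List Int
  | 0 => [1]
  | n + 1 => combRowNext (combRow n)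

-- comb(n, k) = comb_row(n, 1)[k]; only called with 0 ≤ k ≤ n.
def combA (n k : Int) : Int := (combRow n.toNat).getD k.toNat 0

def iter_hypergeom (deck : List Int) (draws : Int) : List (List Int × Int) :=
  match deck with
  | [] => [([], 1)]
  | deck_count :: tail =>
    let deck_size := (deck_count :: tail).sum
    let min_count := max 0 (deck_count + draws - deck_size)
    let max_count := min deck_count draws
    (PySem.List.pyRange min_count (max_count + 1) 1).flatMap (fun count =>
      (iter_hypergeom tail (draws - count)).map (fun p =>
        (count :: p.1, combA draws count * p.2)))

-- ===== PORT B =====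
-- binom by the multiplicative formula: c = c * (n - j) // (j + 1) for j in range(k).
def binomB (n k : Int) : Int :=
  (PySem.List.pyRange 0 k 1).foldl (fun c j => PySem.Int.floordiv (c * (n - j)) (j + 1)) 1

-- one round of the worklist DP: expand every state by every legal count for this card
def altStep (deck_count : Int) (rem : Int) (states : List (List Int × Int × Int)) :
    List (List Int × Int × Int) :=
  states.flatMap (fun s =>
    (PySem.List.pyRange (max 0 (deck_count + s.2.2 - rem)) (min deck_count s.2.2 + 1) 1).map
      (fun count => (s.1 ++ [count], s.2.1 * binomB s.2.2 count, s.2.2 - count)))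

def iter_hypergeom_alt (deck : List Int) (draws : Int) : List (List Int × Int) :=
  let final := deck.foldl
    (fun (st : List (List Int × Int × Int) × Int) (deck_count : Int) =>
      (altStep deck_count st.2 st.1, st.2 - deck_count))
    ([([], 1, draws)], deck.sum)
  final.1.map (fun s => (s.1, s.2.1))

-- ===== PRECONDITION & SPEC =====
def Spec_iter_hypergeom (deck : List Int) (draws : Int) (out : List (List Int × Int)) : Prop := out = iter_hypergeom_alt deck draws
instance (deck : List Int) (draws : Int) (out : List (List Int × Int)) : Decidable (Spec_iter_hypergeom deck draws out) := by unfold Spec_iter_hypergeom; infer_instance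

-- ===== CLAIM (what is proved, stated in full; the proofs are below) =====
def Claim_equal_iter_hypergeom : Prop := ∀ (deck : List Int) (draws : Int), Dom_iter_hypergeom deck draws → Spec_iter_hypergeom deck draws (iter_hypergeom deck draws)

-- ===== LEMMAS AND PROOFS =====

-- A's Pascal rows are the binomial rows
lemma combRow_eq (n : Nat) :
    combRow n = (List.range (n + 1)).map (fun k => ((n.choose k : Nat) : Int)) := by
  induction n with
  | zero => simp [combRow]
  | succ n ih =>
    rw [combRow, ih, combRowNext]
    have hdrop : ((List.range (n + 1)).map (fun k => ((n.choose k : Nat) : Int))).drop 1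
        = (List.range n).map (fun k => ((n.choose (k + 1) : Nat) : Int)) := by
      rw [List.range_succ_eq_map]
      simp [Function.comp]
    have hlast : ((List.range (n + 1)).map (fun k => ((n.choose k : Nat) : Int))).dropLast
        = (List.range n).map (fun k => ((n.choose k : Nat) : Int)) := by
      rw [List.range_succ]
      simp
    have hgl : ((List.range (n + 1)).map (fun k => ((n.choose k : Nat) : Int))).getLastD 0
        = ((n.choose n : Nat) : Int) := by
      rw [List.range_succ]
      simp
    rw [hdrop, hlast, hgl, List.zipWith_map, List.zipWith_self]
    rw [List.range_succ_eq_map (n := n + 1), List.range_succ]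
    simp [Function.comp, Nat.choose_succ_succ']
    intro a _
    ring

lemma combA_eq_choose (n k : Int) (hk : 0 ≤ k) (hkn : k ≤ n) :
    combA n k = (n.toNat.choose k.toNat : Int) := by
  unfold combA
  rw [combRow_eq]
  have hlt : k.toNat < n.toNat + 1 := by omega
  simp [List.getD_eq_getElem?_getD, hlt]

lemma binomB_fold_eq_choose (n : Int) (hn : 0 ≤ n) (m : Nat) (hm : m ≤ n.toNat) :
    (List.range m).foldl
        (fun (c : Int) (j : Nat) => PySem.Int.floordiv (c * (n - (j : Int))) ((j : Int) + 1)) 1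
      = (n.toNat.choose m : Int) := by
  induction m with
  | zero => simp
  | succ m ih =>
    rw [List.range_succ, List.foldl_append, ih (by omega)]
    simp only [List.foldl_cons, List.foldl_nil]
    have hstep : ((n.toNat.choose m : Int)) * (n - m) = (n.toNat.choose (m + 1) : Int) * (m + 1) := by
      have h := Nat.choose_succ_right_eq n.toNat m
      have : ((n.toNat.choose (m + 1) * (m + 1) : Nat) : Int)
          = ((n.toNat.choose m * (n.toNat - m) : Nat) : Int) := by
        exact_mod_cast congrArg (fun x : Nat => (x : Int)) h
      push_cast [Nat.cast_sub (by omega : m ≤ n.toNat)] at this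
      rw [show ((n.toNat : Int)) = n by omega] at this
      linarith [this]
    rw [hstep, PySem.Int.floordiv_eq_ediv_of_pos (by positivity),
        Int.mul_ediv_cancel _ (by positivity)]

lemma binomB_eq_choose (n k : Int) (hk : 0 ≤ k) (hkn : k ≤ n) :
    binomB n k = (n.toNat.choose k.toNat : Int) := by
  unfold binomB
  rw [PySem.List.pyRange_one, List.foldl_map]
  simp only [zero_add, Int.sub_zero]
  exact binomB_fold_eq_choose n (by omega) k.toNat (by omega)

lemma weight_eq (n k : Int) (hk : 0 ≤ k) (hkn : k ≤ n) : combA n k = binomB n k := by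
  rw [combA_eq_choose n k hk hkn, binomB_eq_choose n k hk hkn]

-- DP invariant: running the worklist over `deck` (with the correct suffix size) expands
-- every state by the full recursive enumeration of the remaining cards.
lemma dp_invariant (deck : List Int) (states : List (List Int × Int × Int)) :
    ((deck.foldl
        (fun (st : List (List Int × Int × Int) × Int) (deck_count : Int) =>
          (altStep deck_count st.2 st.1, st.2 - deck_count))
        (states, deck.sum)).1).map (fun s => (s.1, s.2.1))
    = states.flatMap (fun s =>
        (iter_hypergeom deck s.2.2).map (fun p => (s.1 ++ p.1, s.2.1 * p.2))) := by
  induction deck generalizing states with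
  | nil => simp [iter_hypergeom, List.map_eq_flatMap]
  | cons c t ih =>
    rw [List.foldl_cons]
    have hsum : (c :: t).sum - c = t.sum := by simp
    simp only [hsum]
    rw [ih]
    unfold altStep
    rw [List.flatMap_assoc]
    apply List.flatMap_congr
    intro s _
    rw [List.flatMap_map]
    show _ = (iter_hypergeom (c :: t) s.2.2).map _
    rw [iter_hypergeom]
    simp only [List.map_flatMap]
    apply List.flatMap_congr
    intro count hmem
    rw [PySem.List.mem_pyRange_one] at hmem
    obtain ⟨h1, h2⟩ := hmem
    have hc0 : 0 ≤ count := le_trans (le_max_left _ _) h1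
    have hcd : count ≤ s.2.2 := by
      have := min_le_right c s.2.2; omega
    rw [List.map_map]
    apply List.map_congr_left
    intro p _
    simp only [Function.comp]
    rw [weight_eq s.2.2 count hc0 hcd]
    simp [mul_assoc]

-- ===== VERDICT (by name: the statement is the Claim_ definition above) =====
theorem iter_hypergeom_spec : Claim_equal_iter_hypergeom := by
  intro deck draws _
  show iter_hypergeom deck draws = iter_hypergeom_alt deck draws
  unfold iter_hypergeom_alt
  rw [dp_invariant deck [([], 1, draws)]]
  simp
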